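-- pv_equiv track=rewrite | github.com/chriisataide/controle_atendimento_iconnect | scripts/apply_rbac2.py | add_role_func
-- ===== SOURCE A (Python) =====
-- def add_role_func(content, roles, protect=None, skip=None):
--     """Add @role_required after @login_required for function-based views."""
--     protect = protect or []
--     skip = skip or []
--     lines = content.split('\n')
--     out = []
--     i = 0
--     while i < len(lines):
--         out.append(lines[i])
--         if lines[i].strip() == '@login_required':
--             for j in range(i + 1, min(i + 5, len(lines))):
--                 nxt = lines[j].strip()
--                 if nxt.startswith('def '):
--                     fn = nxt.split('(')[0].replace('def ', '')
--                     do_add = True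
--                     if skip and fn in skip:
--                         do_add = False
--                     if protect and fn not in protect:
--                         do_add = False
--                     if do_add:
--                         between = '\n'.join(lines[i + 1:j])
--                         if 'role_required' not in between:
--                             indent = len(lines[i]) - len(lines[i].lstrip())
--                             out.append(' ' * indent + '@role_required' + roles)
--                     break
--                 elif nxt.startswith('@') or nxt == '':
--                     break
--         i += 1
--     return '\n'.join(out)
-- ===== SOURCE B (Python) =====
-- def add_role_func(content, roles, protect=None, skip=None):
--     """Single forward pass: append every line; remember a pending insertion
--     point after '@login_required' and resolve it while scanning ahead."""
--     protect = protect or []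
--     skip = skip or []
--     out = []
--     pend = None  # (insert_index, remaining, between_lines, decorator)
--     for line in content.split('\n'):
--         out.append(line)
--         nxt = line.strip()
--         if pend is not None:
--             p, rem, betw, decor = pend
--             if nxt.startswith('def '):
--                 fn = nxt.split('(')[0].replace('def ', '')
--                 ok = not (skip and fn in skip) and not (protect and fn not in protect)
--                 if ok and 'role_required' not in '\n'.join(betw):
--                     out.insert(p, decor)
--                 pend = None
--             elif nxt.startswith('@') or nxt == '':
--                 pend = None
--             else:
--                 rem -= 1
--                 pend = None if rem == 0 else (p, rem, betw + [line], decor)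
--         if nxt == '@login_required':
--             indent = len(line) - len(line.lstrip())
--             pend = (len(out), 4, [], ' ' * indent + '@role_required' + roles)
--     return '\n'.join(out)
-- ===== Notes on version B (the rewrite author's own statement) =====
-- stated objective: alternative
-- what changed: Replaces A's nested lookahead (outer while over indices plus an inner range(i+1, i+5) scan with list indexing and breaks) by a single forward pass that carries explicit state (pending insertion index, 4-line countdown, accumulated between-lines) and resolves the insertion with list.insert when the def line is reached.
import Mathlib
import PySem

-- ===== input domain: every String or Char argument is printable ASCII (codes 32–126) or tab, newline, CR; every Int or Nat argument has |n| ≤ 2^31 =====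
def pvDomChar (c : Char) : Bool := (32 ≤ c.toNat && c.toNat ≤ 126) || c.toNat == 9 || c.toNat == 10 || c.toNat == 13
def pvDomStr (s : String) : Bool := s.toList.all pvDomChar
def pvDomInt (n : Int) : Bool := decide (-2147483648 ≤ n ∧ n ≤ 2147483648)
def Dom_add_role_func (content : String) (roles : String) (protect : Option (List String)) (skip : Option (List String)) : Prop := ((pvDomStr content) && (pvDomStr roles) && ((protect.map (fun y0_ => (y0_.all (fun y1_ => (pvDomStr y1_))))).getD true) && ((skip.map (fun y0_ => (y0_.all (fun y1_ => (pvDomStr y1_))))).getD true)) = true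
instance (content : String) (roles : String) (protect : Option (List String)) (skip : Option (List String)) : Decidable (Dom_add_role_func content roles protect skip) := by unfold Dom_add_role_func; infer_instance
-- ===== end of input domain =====

-- B is a single forward pass (state machine with a pending insertion point) instead of A's
-- nested 4-line lookahead with list indexing; same return value, objective: alternative.

-- ===== PORT A =====

-- fn = nxt.split('(')[0].replace('def ', '')   (sep "(" is nonempty, so split? is some)
def pvAFn (nxt : String) : String :=
  PySem.Str.replace (((PySem.Str.split? nxt "(").getD []).headD "") "def " ""

-- do_add = True; if skip and fn in skip: False; if protect and fn not in protect: False
def pvADoAdd (protect skip : List String) (fn : String) : Bool :=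
  let d := true
  let d := if !skip.isEmpty && skip.contains fn then false else d
  let d := if !protect.isEmpty && !protect.contains fn then false else d
  d

-- ' ' * indent + '@role_required' + roles, indent = len(line) - len(line.lstrip())
def pvADecor (line roles : String) : String :=
  String.ofList (List.replicate (PySem.Str.len line - PySem.Str.len (PySem.Str.lstrip line)).toNat ' '
             ++ ("@role_required".toList ++ roles.toList))

-- the inner 'for j in range(i+1, min(i+5, len(lines)))' loop; returns the decorator to append, if any
def pvAScan (lines : List String) (roles : String) (protect skip : List String)
    (lineI : String) (i j stop : Nat) : Option String :=
  if _h : j < stop then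
    let nxt := PySem.Str.strip (lines.getD j "")
    if PySem.Str.startswith nxt "def " then
      let fn := pvAFn nxt
      if pvADoAdd protect skip fn then
        let between := PySem.Str.join "\n" (PySem.List.slice lines (some ((i + 1 : Nat) : Int)) (some ((j : Nat) : Int)))
        if PySem.Str.isIn "role_required" between then none
        else some (pvADecor lineI roles)
      else none
    else if PySem.Str.startswith nxt "@" || nxt == "" then none
    else pvAScan lines roles protect skip lineI i (j + 1) stop
  else none
termination_by stop - j

-- the outer 'while i < len(lines)' loop
def pvALoop (lines : List String) (roles : String) (protect skip : List String)
    (i : Nat) (out : List String) : List String :=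
  if _h : i < lines.length then
    let line := lines.getD i ""
    let out1 := out ++ [line]
    let out2 :=
      if PySem.Str.strip line == "@login_required" then
        match pvAScan lines roles protect skip line i (i + 1) (min (i + 5) lines.length) with
        | some d => out1 ++ [d]
        | none => out1
      else out1
    pvALoop lines roles protect skip (i + 1) out2
  else out
termination_by lines.length - i

def add_role_func (content : String) (roles : String) (protect : Option (List String)) (skip : Option (List String)) : String :=
  let protectL := protect.getD []
  let skipL := skip.getD []
  let lines := (PySem.Str.split? content "\n").getD []   -- sep "\n" ≠ "", split? is always some
  PySem.Str.join "\n" (pvALoop lines roles protectL skipL 0 [])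

-- ===== PORT B =====

def pvBFn (nxt : String) : String :=
  PySem.Str.replace (((PySem.Str.split? nxt "(").getD []).headD "") "def " ""

def pvBOk (protect skip : List String) (fn : String) : Bool :=
  !(!skip.isEmpty && skip.contains fn) && !(!protect.isEmpty && !protect.contains fn)

def pvBDecor (line roles : String) : String :=
  String.ofList (List.replicate (PySem.Str.len line - PySem.Str.len (PySem.Str.lstrip line)).toNat ' '
             ++ ("@role_required".toList ++ roles.toList))

-- one line of the single pass; state = (out, pending), pending = (insert index, remaining, between, decorator)
def pvBStep (roles : String) (protect skip : List String)
    (st : List String × Option (Nat × Nat × List String × String)) (line : String) :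
    List String × Option (Nat × Nat × List String × String) :=
  match st with
  | (out0, pend) =>
    let out := out0 ++ [line]
    let nxt := PySem.Str.strip line
    let res : List String × Option (Nat × Nat × List String × String) :=
      match pend with
      | some (p, rem, betw, decor) =>
        if PySem.Str.startswith nxt "def " then
          if pvBOk protect skip (pvBFn nxt)
             && !PySem.Str.isIn "role_required" (PySem.Str.join "\n" betw) then
            (PySem.List.insert out (p : Int) decor, none)
          else (out, none)
        else if PySem.Str.startswith nxt "@" || nxt == "" then (out, none)
        else if rem - 1 == 0 then (out, none)
        else (out, some (p, rem - 1, betw ++ [line], decor))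
      | none => (out, none)
    if nxt == "@login_required" then (res.1, some (res.1.length, 4, [], pvBDecor line roles))
    else res

def add_role_func_alt (content : String) (roles : String) (protect : Option (List String)) (skip : Option (List String)) : String :=
  let protectL := protect.getD []
  let skipL := skip.getD []
  let lines := (PySem.Str.split? content "\n").getD []   -- sep "\n" ≠ "", split? is always some
  PySem.Str.join "\n" ((lines.foldl (pvBStep roles protectL skipL) ([], none)).1)

-- ===== PRECONDITION & SPEC =====
def Spec_add_role_func (content : String) (roles : String) (protect : Option (List String)) (skip : Option (List String)) (out : String) : Prop := out = add_role_func_alt content roles protect skip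
instance (content : String) (roles : String) (protect : Option (List String)) (skip : Option (List String)) (out : String) : Decidable (Spec_add_role_func content roles protect skip out) := by unfold Spec_add_role_func; infer_instance

-- ===== CLAIM (what is proved, stated in full; the proofs are below) =====
def Claim_equal_add_role_func : Prop := ∀ (content : String) (roles : String) (protect : Option (List String)) (skip : Option (List String)), Dom_add_role_func content roles protect skip → Spec_add_role_func content roles protect skip (add_role_func content roles protect skip)

-- ===== LEMMAS AND PROOFS =====

theorem pvStartsDef_ne_login {nxt : String}
    (h : PySem.Str.startswith nxt "def " = true) : (nxt == "@login_required") = false := by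
  by_cases he : nxt = "@login_required"
  · subst he; exact absurd h (by decide)
  · simp [he]


theorem pvDoAdd_eq (protect skip : List String) (fn : String) :
    pvADoAdd protect skip fn = pvBOk protect skip fn := by
  unfold pvADoAdd pvBOk
  cases h1 : (!skip.isEmpty && skip.contains fn) <;>
    cases h2 : (!protect.isEmpty && !protect.contains fn) <;> simp

theorem pvDecor_eq (line roles : String) : pvADecor line roles = pvBDecor line roles := rfl

theorem pvFn_eq (nxt : String) : pvAFn nxt = pvBFn nxt := rfl

-- pvAScan unfolding lemmas
theorem pvScan_stop (lines : List String) (roles : String) (protect skip : List String)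
    (lineI : String) (i j stop : Nat) (h : stop ≤ j) :
    pvAScan lines roles protect skip lineI i j stop = none := by
  rw [pvAScan]; simp [Nat.not_lt.mpr h]

theorem pvScan_def (lines : List String) (roles : String) (protect skip : List String)
    (lineI : String) (i j stop : Nat) (hj : j < lines.length) (hstop : j < stop)
    (hdef : PySem.Str.startswith (PySem.Str.strip lines[j]) "def " = true) :
    pvAScan lines roles protect skip lineI i j stop =
      (if pvBOk protect skip (pvBFn (PySem.Str.strip lines[j]))
          && !PySem.Str.isIn "role_required"
               (PySem.Str.join "\n" ((lines.drop (i+1)).take (j - (i+1))))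
       then some (pvADecor lineI roles) else none) := by
  rw [pvAScan]
  rw [dif_pos hstop]
  rw [List.getD_eq_getElem lines "" hj]
  rw [if_pos hdef]
  rw [PySem.List.slice_natCast lines (i+1) j]
  simp only [pvDoAdd_eq, pvFn_eq]
  cases hc1 : pvBOk protect skip (pvBFn (PySem.Str.strip lines[j])) <;>
    cases hc2 : PySem.Str.isIn "role_required"
        (PySem.Str.join "\n" (List.take (j - (i+1)) (List.drop (i+1) lines))) <;>
      simp

theorem pvScan_def_pos (lines : List String) (roles : String) (protect skip : List String)
    (lineI : String) (i j stop : Nat) (hj : j < lines.length) (hstop : j < stop)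
    (hdef : PySem.Str.startswith (PySem.Str.strip lines[j]) "def " = true)
    (hc : (pvBOk protect skip (pvBFn (PySem.Str.strip lines[j]))
        && !PySem.Str.isIn "role_required"
             (PySem.Str.join "\n" ((lines.drop (i+1)).take (j - (i+1))))) = true) :
    pvAScan lines roles protect skip lineI i j stop = some (pvADecor lineI roles) := by
  rw [pvScan_def lines roles protect skip lineI i j stop hj hstop hdef, if_pos hc]

theorem pvScan_def_neg (lines : List String) (roles : String) (protect skip : List String)
    (lineI : String) (i j stop : Nat) (hj : j < lines.length) (hstop : j < stop)
    (hdef : PySem.Str.startswith (PySem.Str.strip lines[j]) "def " = true)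
    (hc : (pvBOk protect skip (pvBFn (PySem.Str.strip lines[j]))
        && !PySem.Str.isIn "role_required"
             (PySem.Str.join "\n" ((lines.drop (i+1)).take (j - (i+1))))) = false) :
    pvAScan lines roles protect skip lineI i j stop = none := by
  rw [pvScan_def lines roles protect skip lineI i j stop hj hstop hdef, if_neg (by simp only [hc]; decide)]

theorem pvScan_at (lines : List String) (roles : String) (protect skip : List String)
    (lineI : String) (i j stop : Nat) (hj : j < lines.length) (hstop : j < stop)
    (hdef : ¬ PySem.Str.startswith (PySem.Str.strip lines[j]) "def " = true)
    (hat : (PySem.Str.startswith (PySem.Str.strip lines[j]) "@" || (PySem.Str.strip lines[j] == "")) = true) :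
    pvAScan lines roles protect skip lineI i j stop = none := by
  rw [pvAScan]
  rw [dif_pos hstop]
  rw [List.getD_eq_getElem lines "" hj]
  rw [if_neg hdef, if_pos hat]

theorem pvScan_plain (lines : List String) (roles : String) (protect skip : List String)
    (lineI : String) (i j stop : Nat) (hj : j < lines.length) (hstop : j < stop)
    (hdef : ¬ PySem.Str.startswith (PySem.Str.strip lines[j]) "def " = true)
    (hat : ¬ (PySem.Str.startswith (PySem.Str.strip lines[j]) "@" || (PySem.Str.strip lines[j] == "")) = true) :
    pvAScan lines roles protect skip lineI i j stop =
      pvAScan lines roles protect skip lineI i (j+1) stop := by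
  conv_lhs => rw [pvAScan]
  rw [dif_pos hstop]
  rw [List.getD_eq_getElem lines "" hj]
  rw [if_neg hdef, if_neg hat]

-- pvALoop unfolding lemmas
theorem pvLoop_out (lines : List String) (roles : String) (protect skip : List String)
    (i : Nat) (out : List String) (h : lines.length ≤ i) :
    pvALoop lines roles protect skip i out = out := by
  rw [pvALoop]; simp [Nat.not_lt.mpr h]

theorem pvLoop_step_plain (lines : List String) (roles : String) (protect skip : List String)
    (i : Nat) (out : List String) (hi : i < lines.length)
    (ht : ¬ PySem.Str.strip lines[i] = "@login_required") :
    pvALoop lines roles protect skip i out =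
      pvALoop lines roles protect skip (i+1) (out ++ [lines[i]]) := by
  conv_lhs => rw [pvALoop]
  rw [dif_pos hi]
  rw [List.getD_eq_getElem lines "" hi]
  simp only [beq_iff_eq, if_neg ht]

theorem pvLoop_step_trigger (lines : List String) (roles : String) (protect skip : List String)
    (i : Nat) (out : List String) (hi : i < lines.length)
    (ht : PySem.Str.strip lines[i] = "@login_required") :
    pvALoop lines roles protect skip i out =
      pvALoop lines roles protect skip (i+1)
        (match pvAScan lines roles protect skip lines[i] i (i+1) (min (i+5) lines.length) with
         | some d => (out ++ [lines[i]]) ++ [d]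
         | none => out ++ [lines[i]]) := by
  conv_lhs => rw [pvALoop]
  rw [dif_pos hi]
  rw [List.getD_eq_getElem lines "" hi]
  simp only [beq_iff_eq, if_pos ht]

-- pvBStep unfolding lemmas
theorem pvStep_none_plain (roles : String) (protect skip : List String)
    (out : List String) (line : String) (ht : ¬ PySem.Str.strip line = "@login_required") :
    pvBStep roles protect skip (out, none) line = (out ++ [line], none) := by
  unfold pvBStep
  simp only [beq_iff_eq, if_neg ht]

theorem pvStep_none_trigger (roles : String) (protect skip : List String)
    (out : List String) (line : String) (ht : PySem.Str.strip line = "@login_required") :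
    pvBStep roles protect skip (out, none) line =
      (out ++ [line], some ((out ++ [line]).length, 4, [], pvBDecor line roles)) := by
  unfold pvBStep
  simp only [beq_iff_eq, if_pos ht]

theorem pvStep_pend_def (roles : String) (protect skip : List String)
    (out : List String) (line : String) (p rem : Nat) (betw : List String) (decor : String)
    (hdef : PySem.Str.startswith (PySem.Str.strip line) "def " = true) :
    pvBStep roles protect skip (out, some (p, rem, betw, decor)) line =
      (if pvBOk protect skip (pvBFn (PySem.Str.strip line))
          && !PySem.Str.isIn "role_required" (PySem.Str.join "\n" betw)
       then (PySem.List.insert (out ++ [line]) (p : Int) decor, none)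
       else (out ++ [line], none)) := by
  unfold pvBStep
  simp only [hdef, if_true]
  have hne := pvStartsDef_ne_login hdef
  cases hc : (pvBOk protect skip (pvBFn (PySem.Str.strip line))
      && !PySem.Str.isIn "role_required" (PySem.Str.join "\n" betw)) <;>
    simp [hne]

theorem pvStep_pend_at (roles : String) (protect skip : List String)
    (out : List String) (line : String) (p rem : Nat) (betw : List String) (decor : String)
    (hdef : ¬ PySem.Str.startswith (PySem.Str.strip line) "def " = true)
    (hat : (PySem.Str.startswith (PySem.Str.strip line) "@" || (PySem.Str.strip line == "")) = true) :
    pvBStep roles protect skip (out, some (p, rem, betw, decor)) line =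
      (if PySem.Str.strip line = "@login_required"
       then (out ++ [line], some ((out ++ [line]).length, 4, [], pvBDecor line roles))
       else (out ++ [line], none)) := by
  unfold pvBStep
  simp only [Bool.not_eq_true] at hdef
  simp only [hdef, Bool.false_eq_true, if_false, hat, if_true, beq_iff_eq]

theorem pvStep_pend_plain (roles : String) (protect skip : List String)
    (out : List String) (line : String) (p rem : Nat) (betw : List String) (decor : String)
    (hdef : ¬ PySem.Str.startswith (PySem.Str.strip line) "def " = true)
    (hat : ¬ (PySem.Str.startswith (PySem.Str.strip line) "@" || (PySem.Str.strip line == "")) = true) :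
    pvBStep roles protect skip (out, some (p, rem, betw, decor)) line =
      (out ++ [line],
       if rem - 1 = 0 then none else some (p, rem - 1, betw ++ [line], decor)) := by
  unfold pvBStep
  have ht : ¬ PySem.Str.strip line = "@login_required" := by
    intro h; apply hat; rw [h]; decide
  simp only [Bool.not_eq_true] at hdef
  simp only [hdef, Bool.false_eq_true, if_false, beq_iff_eq, if_neg ht]
  simp only [Bool.not_eq_true] at hat
  simp only [hat, Bool.false_eq_true, if_false]
  by_cases hr : rem - 1 = 0 <;> simp [hr]

theorem pvFinishSome (lines : List String) (roles : String) (protect skip : List String)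
    (i j : Nat) (out0 : List String) (d : String)
    (hj : j < lines.length) (ht : ¬ PySem.Str.strip lines[j] = "@login_required") :
    pvALoop lines roles protect skip (j+1)
        (out0 ++ d :: (List.take (j-(i+1)) (List.drop (i+1) lines) ++ [lines[j]]))
      = pvALoop lines roles protect skip j
        (out0 ++ d :: List.take (j-(i+1)) (List.drop (i+1) lines)) := by
  rw [pvLoop_step_plain _ _ _ _ j _ hj ht]
  simp

-- the combined invariant: C1 relates A's outer loop to B's fold with no pending state,
-- C2 relates A's inner lookahead to B's fold while a pending insertion is active
theorem pvMain (lines : List String) (roles : String) (protect skip : List String) :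
    ∀ n : Nat,
      (∀ i out, lines.length - i ≤ n →
        ((lines.drop i).foldl (pvBStep roles protect skip) (out, none)).1
          = pvALoop lines roles protect skip i out)
      ∧
      (∀ i j out0, i < lines.length → i + 1 ≤ j → j ≤ i + 4 → lines.length - j ≤ n →
        ((lines.drop j).foldl (pvBStep roles protect skip)
           (out0 ++ (lines.drop (i+1)).take (j - (i+1)),
            some (out0.length, i + 5 - j, (lines.drop (i+1)).take (j - (i+1)),
                  pvADecor (lines.getD i "") roles))).1
        =
        match pvAScan lines roles protect skip (lines.getD i "") i j (min (i+5) lines.length) with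
        | some d => pvALoop lines roles protect skip j (out0 ++ d :: (lines.drop (i+1)).take (j - (i+1)))
        | none => pvALoop lines roles protect skip j (out0 ++ (lines.drop (i+1)).take (j - (i+1)))) := by
  intro n
  induction n with
  | zero =>
    constructor
    · intro i out hle
      have hi : lines.length ≤ i := by omega
      rw [List.drop_eq_nil_of_le hi, pvLoop_out _ _ _ _ _ _ hi]
      rfl
    · intro i j out0 hi hij hj4 hle
      have hj : lines.length ≤ j := by omega
      rw [List.drop_eq_nil_of_le hj,
          pvScan_stop _ _ _ _ _ _ _ _ (by omega : min (i+5) lines.length ≤ j),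
          pvLoop_out _ _ _ _ _ _ hj]
      rfl
  | succ n ih =>
    obtain ⟨ih1, ih2⟩ := ih
    constructor
    · -- C1
      intro i out hle
      by_cases hi : i < lines.length
      · rw [List.drop_eq_getElem_cons hi, List.foldl_cons]
        by_cases ht : PySem.Str.strip lines[i] = "@login_required"
        · rw [pvStep_none_trigger _ _ _ _ _ ht,
              pvLoop_step_trigger _ _ _ _ i out hi ht]
          have h2 := ih2 i (i+1) (out ++ [lines[i]]) hi (le_refl _) (by omega) (by omega)
          have e1 : i + 1 - (i + 1) = 0 := by omega
          have e2 : i + 5 - (i + 1) = 4 := by omega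
          rw [e1, e2, List.take_zero, List.append_nil,
              List.getD_eq_getElem lines "" hi, pvDecor_eq] at h2
          rw [h2]
          cases hscan : pvAScan lines roles protect skip lines[i] i (i+1) (min (i+5) lines.length) <;>
            simp
        · rw [pvStep_none_plain _ _ _ _ _ ht,
              pvLoop_step_plain _ _ _ _ i out hi ht]
          exact ih1 (i+1) _ (by omega)
      · have hle' : lines.length ≤ i := by omega
        rw [List.drop_eq_nil_of_le hle', pvLoop_out _ _ _ _ _ _ hle']
        rfl
    · -- C2
      intro i j out0 hi hij hj4 hle
      by_cases hj : j < lines.length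
      swap
      · have hj' : lines.length ≤ j := by omega
        rw [List.drop_eq_nil_of_le hj',
            pvScan_stop _ _ _ _ _ _ _ _ (by omega : min (i+5) lines.length ≤ j),
            pvLoop_out _ _ _ _ _ _ hj']
        rfl
      · have hjstop : j < min (i+5) lines.length := by omega
        rw [List.drop_eq_getElem_cons hj, List.foldl_cons]
        by_cases hdef : PySem.Str.startswith (PySem.Str.strip lines[j]) "def " = true
        · -- the resolving 'def' line
          have ht : ¬ PySem.Str.strip lines[j] = "@login_required" := by
            intro h; rw [h] at hdef; exact absurd hdef (by decide)
          rw [pvStep_pend_def _ _ _ _ _ _ _ _ _ hdef]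
          have hlen : out0.length ≤ ((out0 ++ (lines.drop (i+1)).take (j - (i+1))) ++ [lines[j]]).length := by
            simp
          by_cases hc : (pvBOk protect skip (pvBFn (PySem.Str.strip lines[j]))
              && !PySem.Str.isIn "role_required"
                   (PySem.Str.join "\n" ((lines.drop (i+1)).take (j - (i+1))))) = true
          · rw [if_pos hc, ih1 (j+1) _ (by omega), PySem.List.insert_natCast _ _ _ hlen]
            simp only [pvScan_def_pos lines roles protect skip (lines.getD i "") i j _ hj hjstop hdef hc]
            rw [pvLoop_step_plain _ _ _ _ j _ hj ht]
            rw [List.append_assoc out0, List.take_left, List.drop_left]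
            simp
          · rw [Bool.not_eq_true] at hc
            rw [if_neg (by simp only [hc]; decide), ih1 (j+1) _ (by omega)]
            simp only [pvScan_def_neg lines roles protect skip (lines.getD i "") i j _ hj hjstop hdef hc]
            rw [pvLoop_step_plain _ _ _ _ j _ hj ht]
        · by_cases hat : (PySem.Str.startswith (PySem.Str.strip lines[j]) "@"
              || (PySem.Str.strip lines[j] == "")) = true
          · -- a decorator or blank line cancels the pending insert
            rw [pvStep_pend_at _ _ _ _ _ _ _ _ _ hdef hat]
            simp only [pvScan_at lines roles protect skip (lines.getD i "") i j _ hj hjstop hdef hat]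
            by_cases ht : PySem.Str.strip lines[j] = "@login_required"
            · rw [if_pos ht]
              have h2 := ih2 j (j+1) ((out0 ++ (lines.drop (i+1)).take (j - (i+1))) ++ [lines[j]])
                hj (le_refl _) (by omega) (by omega)
              have e1 : j + 1 - (j + 1) = 0 := by omega
              have e2 : j + 5 - (j + 1) = 4 := by omega
              rw [e1, e2, List.take_zero, List.append_nil,
                  List.getD_eq_getElem lines "" hj, pvDecor_eq] at h2
              rw [h2]
              rw [pvLoop_step_trigger _ _ _ _ j _ hj ht]
              cases hscan : pvAScan lines roles protect skip lines[j] j (j+1) (min (j+5) lines.length) <;>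
                simp
            · rw [if_neg ht, ih1 (j+1) _ (by omega), pvLoop_step_plain _ _ _ _ j _ hj ht]
          · -- an ordinary line: the countdown continues (or expires)
            have ht : ¬ PySem.Str.strip lines[j] = "@login_required" := by
              intro h; apply hat; rw [h]; decide
            rw [pvStep_pend_plain _ _ _ _ _ _ _ _ _ hdef hat]
            by_cases hlast : i + 5 - j - 1 = 0
            · rw [if_pos hlast, ih1 (j+1) _ (by omega)]
              rw [pvScan_plain lines roles protect skip (lines.getD i "") i j _ hj hjstop hdef hat]
              simp only [pvScan_stop lines roles protect skip (lines.getD i "") i (j+1) _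
                (by omega : min (i+5) lines.length ≤ j+1)]
              rw [pvLoop_step_plain _ _ _ _ j _ hj ht]
            · rw [if_neg hlast]
              have hk : j - (i+1) < (lines.drop (i+1)).length := by
                simp only [List.length_drop]; omega
              have hb : (lines.drop (i+1)).take (j+1 - (i+1))
                  = (lines.drop (i+1)).take (j - (i+1)) ++ [lines[j]] := by
                have h := List.take_concat_get (l := lines.drop (i+1)) (i := j - (i+1)) hk
                rw [List.concat_eq_append] at h
                have hq : (lines.drop (i+1))[j - (i+1)] = lines[j] := by
                  rw [List.getElem_drop]; congr 1; omega
                rw [hq] at h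
                have e : j + 1 - (i+1) = (j - (i+1)) + 1 := by omega
                rw [e, ← h]
              have h2 := ih2 i (j+1) out0 hi (by omega) (by omega) (by omega)
              rw [hb] at h2
              have e3 : i + 5 - (j + 1) = i + 5 - j - 1 := by omega
              rw [e3, ← List.append_assoc] at h2
              rw [h2]
              rw [pvScan_plain lines roles protect skip (lines.getD i "") i j _ hj hjstop hdef hat]
              cases hscan : pvAScan lines roles protect skip (lines.getD i "") i (j+1) (min (i+5) lines.length) with
              | some d =>
                exact pvFinishSome lines roles protect skip i j out0 d hj ht
              | none =>
                rw [pvLoop_step_plain _ _ _ _ j _ hj ht]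

-- ===== VERDICT (by name: the statement is the Claim_ definition above) =====
theorem add_role_func_spec : Claim_equal_add_role_func := by
  intro content roles protect skip _
  unfold Spec_add_role_func add_role_func add_role_func_alt
  have h := (pvMain ((PySem.Str.split? content "\n").getD []) roles (protect.getD []) (skip.getD [])
      ((PySem.Str.split? content "\n").getD []).length).1 0 [] (by omega)
  simp only [List.drop_zero] at h
  exact congrArg (PySem.Str.join "\n") h.symm
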